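-- pv_equiv track=rewrite | github.com/kubernetes/website | scripts/content_detection_benchmark/generate_repo.py | gm_change_kubectl_apply
-- ===== SOURCE A (Python) =====
-- def gm_change_kubectl_apply(lines, fm):
--     """Replace first 'kubectl apply' in a code block with 'kubectl create'."""
--     in_code = False
--     for i in range(fm, len(lines)):
--         if lines[i].strip().startswith("```") or lines[i].strip().startswith("~~~"):
--             in_code = not in_code
--             continue
--         if in_code and "kubectl apply" in lines[i]:
--             lines = list(lines)
--             lines[i] = lines[i].replace("kubectl apply", "kubectl create", 1)
--             return lines, True
--     return lines, False
-- ===== SOURCE B (Python) =====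
-- def _fence(line):
--     return line.strip().startswith("```") or line.strip().startswith("~~~")
--
--
-- def gm_change_kubectl_apply(lines, fm):
--     """Two-pass rewrite: first mark which tail lines are inside a code block,
--     then scan the marked lines for the first 'kubectl apply'."""
--     tail = lines[fm:]
--     flags = []
--     in_code = False
--     for line in tail:
--         if _fence(line):
--             flags.append(False)
--             in_code = not in_code
--         else:
--             flags.append(in_code)
--     idx = fm
--     for flag, line in zip(flags, tail):
--         if flag and "kubectl apply" in line:
--             new = list(lines)
--             new[idx] = line.replace("kubectl apply", "kubectl create", 1)
--             return new, True
--         idx += 1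
--     return lines, False
-- ===== Notes on version B (the rewrite author's own statement) =====
-- stated objective: alternative
-- what changed: A's single stateful scan is split into two passes: pass one computes a boolean in-code flag list for the tail (toggling on fence lines, never marking the fences), pass two scans the zipped flags/lines for the first flagged 'kubectl apply'.
import Mathlib
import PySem

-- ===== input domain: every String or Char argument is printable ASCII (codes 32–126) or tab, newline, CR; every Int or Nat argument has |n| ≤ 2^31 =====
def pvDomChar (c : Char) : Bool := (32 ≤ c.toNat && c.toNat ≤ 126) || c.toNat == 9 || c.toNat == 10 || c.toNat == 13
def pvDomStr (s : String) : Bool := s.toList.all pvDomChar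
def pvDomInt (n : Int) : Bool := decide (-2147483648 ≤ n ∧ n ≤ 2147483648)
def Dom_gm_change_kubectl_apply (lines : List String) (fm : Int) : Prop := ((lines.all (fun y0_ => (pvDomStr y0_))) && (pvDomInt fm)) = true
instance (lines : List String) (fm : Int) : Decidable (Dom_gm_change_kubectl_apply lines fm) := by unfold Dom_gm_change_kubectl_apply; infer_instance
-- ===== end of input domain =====

-- B replaces A's single stateful index loop by a two-pass decomposition (flag list, then scan); same cost, proved equal on the natural domain fm ≥ 0.
-- Note: A mutates `lines` only via a fresh copy (`lines = list(lines)`), so the callers' list is never changed; the equivalence is about the return value.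

-- s.replace(old, new, 1): replace the leftmost occurrence of old (exact for nonempty old, which is how both programs call it)
def pvReplace1 (s old new : String) : String :=
  let i := PySem.Chars.find s.toList old.toList
  if i = -1 then s
  else String.ofList (s.toList.take i.toNat ++ new.toList ++ s.toList.drop (i.toNat + old.toList.length))

-- ===== PORT A =====
def gmLoopA (lines : List String) (idxs : List Int) (in_code : Bool) : List String × Bool :=
  match idxs with
  | [] => (lines, false)
  | i :: rest =>
    let s := PySem.List.pyGetD lines i ""   -- lines[i]; total form, in range for every i in range(fm, len) once fm ≥ 0 (Pre_)
    if PySem.Str.startswith (PySem.Str.strip s) "```" || PySem.Str.startswith (PySem.Str.strip s) "~~~" then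
      gmLoopA lines rest (!in_code)
    else if in_code && PySem.Str.isIn "kubectl apply" s then
      (PySem.List.pySetD lines i (pvReplace1 s "kubectl apply" "kubectl create"), true)
    else gmLoopA lines rest in_code

def gm_change_kubectl_apply (lines : List String) (fm : Int) : List String × Bool :=
  gmLoopA lines (PySem.List.pyRange fm lines.length 1) false

-- ===== PORT B =====
def pvFence (line : String) : Bool :=
  PySem.Str.startswith (PySem.Str.strip line) "```" || PySem.Str.startswith (PySem.Str.strip line) "~~~"

-- pass 1: the in-code flag of each tail line (fence lines themselves are never flagged)
def pvFlags (in_code : Bool) : List String → List Bool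
  | [] => []
  | line :: rest =>
    if pvFence line then false :: pvFlags (!in_code) rest
    else in_code :: pvFlags in_code rest

-- pass 2: first flagged line containing 'kubectl apply'
def pvScan (lines : List String) (idx : Int) : List (Bool × String) → List String × Bool
  | [] => (lines, false)
  | (flag, line) :: rest =>
    if flag && PySem.Str.isIn "kubectl apply" line then
      (PySem.List.pySetD lines idx (pvReplace1 line "kubectl apply" "kubectl create"), true)
    else pvScan lines (idx + 1) rest

def gm_change_kubectl_apply_alt (lines : List String) (fm : Int) : List String × Bool :=
  pvScan lines fm ((pvFlags false (PySem.List.slice lines (some fm) none)).zip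
    (PySem.List.slice lines (some fm) none))

-- ===== PRECONDITION & SPEC =====
-- Pre_ excludes negative fm, outside the function's natural domain (fm is the line index just past the front matter):
-- for -len ≤ fm < 0 A scans with Python's negative-index wraparound (an implementation accident), and for fm < -len A raises IndexError.
def Pre_gm_change_kubectl_apply (lines : List String) (fm : Int) : Prop := 0 ≤ fm
instance (lines : List String) (fm : Int) : Decidable (Pre_gm_change_kubectl_apply lines fm) := by unfold Pre_gm_change_kubectl_apply; infer_instance

def pvWitness_gm_change_kubectl_apply : List String × Int := (["```", "kubectl apply -f x.yaml", "```"], 0)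

def Spec_gm_change_kubectl_apply (lines : List String) (fm : Int) (out : List String × Bool) : Prop := out = gm_change_kubectl_apply_alt lines fm
instance (lines : List String) (fm : Int) (out : List String × Bool) : Decidable (Spec_gm_change_kubectl_apply lines fm out) := by unfold Spec_gm_change_kubectl_apply; infer_instance

-- ===== CLAIM (what is proved, stated in full; the proofs are below) =====
def Claim_equal_gm_change_kubectl_apply : Prop := ∀ (lines : List String) (fm : Int), Dom_gm_change_kubectl_apply lines fm → Pre_gm_change_kubectl_apply lines fm → Spec_gm_change_kubectl_apply lines fm (gm_change_kubectl_apply lines fm)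

-- ===== LEMMAS AND PROOFS =====

lemma gm_main (lines : List String) :
    ∀ (n k : Nat) (c : Bool), n = lines.length - k →
    gmLoopA lines (PySem.List.pyRange (k : Int) (lines.length : Int) 1) c
      = pvScan lines (k : Int) ((pvFlags c (lines.drop k)).zip (lines.drop k)) := by
  intro n
  induction n with
  | zero =>
    intro k c h
    have hk : lines.length ≤ k := by omega
    rw [PySem.List.pyRange_one_eq_nil (by exact_mod_cast hk), List.drop_of_length_le hk]
    rfl
  | succ n ih =>
    intro k c h
    have hk : k < lines.length := by omega
    rw [PySem.List.pyRange_one_cons (by exact_mod_cast hk),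
        List.drop_eq_getElem_cons hk]
    show gmLoopA lines (_ :: _) c = _
    unfold gmLoopA
    have hget : PySem.List.pyGetD lines (k : Int) "" = lines[k] := by
      simp [PySem.List.pyGetD_natCast, List.getD, List.getElem?_eq_getElem hk]
    rw [hget]
    by_cases hf : pvFence lines[k]
    · have hf' := hf
      unfold pvFence at hf'
      rw [if_pos hf', pvFlags]
      rw [if_pos hf]
      show _ = pvScan lines (k : Int) ((false, lines[k]) :: _)
      rw [pvScan]
      simp only [Bool.false_and]
      rw [if_neg Bool.false_ne_true]
      have : ((k : Int) + 1) = ((k + 1 : Nat) : Int) := by push_cast; ring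
      rw [this]
      exact ih (k + 1) (!c) (by omega)
    · have hf2 := hf
      unfold pvFence at hf2
      rw [if_neg hf2, pvFlags, if_neg hf]
      show _ = pvScan lines (k : Int) ((c, lines[k]) :: _)
      rw [pvScan]
      by_cases hm : (c && PySem.Str.isIn "kubectl apply" lines[k]) = true
      · rw [if_pos hm, if_pos hm]
      · rw [if_neg hm, if_neg hm]
        have : ((k : Int) + 1) = ((k + 1 : Nat) : Int) := by push_cast; ring
        rw [this]
        exact ih (k + 1) c (by omega)

-- ===== VERDICT (by name: the statement is the Claim_ definition above) =====
theorem gm_change_kubectl_apply_spec : Claim_equal_gm_change_kubectl_apply := by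
  intro lines fm _ hpre
  unfold Spec_gm_change_kubectl_apply gm_change_kubectl_apply gm_change_kubectl_apply_alt
  have h0 : (0 : Int) ≤ fm := hpre
  have hfm : fm = ((fm.toNat : Nat) : Int) := by omega
  rw [hfm, PySem.List.slice_from_natCast]
  exact gm_main lines (lines.length - fm.toNat) fm.toNat false rfl
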